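-- pv_equiv track=rewrite | github.com/evanstanderwick/OSU-Ling3802-PhishingEmailFeatures | dataParser.py | findKeywordsSL
-- ===== SOURCE A (Python) =====
-- SUBJSYMBOLSCUTOFF = 1
--
-- def findKeywordsSL(subjectLine):
--     slKeys = ['action', 'response', 'urgent', 'required'] #add more
--     slWords = subjectLine.split()
--     cutoff = SUBJSYMBOLSCUTOFF
--
--     #loop through list and count number of spamWords
--     count = 0
--     for x in slWords:
--       for y in slKeys:
--         if (x == y):
--           count += 1
--
--     #Compare with cutoff
--     if count >= cutoff:
--       keyWordFeatureSL = "subjectLine_keywords:high"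
--     else:
--       keyWordFeatureSL = "subjectLine_keywords:low"
--
--     #return
--     return keyWordFeatureSL
-- ===== SOURCE B (Python) =====
-- SUBJSYMBOLSCUTOFF = 1
--
-- def findKeywordsSL(subjectLine):
--     slKeys = {'action', 'response', 'urgent', 'required'}
--     if any(w in slKeys for w in subjectLine.split()):
--         return "subjectLine_keywords:high"
--     return "subjectLine_keywords:low"
-- ===== Notes on version B (the rewrite author's own statement) =====
-- stated objective: simpler
-- what changed: Replaces the nested count-then-compare loops with a short-circuiting existence test against a keyword set; no counter is maintained since the cutoff is 1.
import Mathlib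
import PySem

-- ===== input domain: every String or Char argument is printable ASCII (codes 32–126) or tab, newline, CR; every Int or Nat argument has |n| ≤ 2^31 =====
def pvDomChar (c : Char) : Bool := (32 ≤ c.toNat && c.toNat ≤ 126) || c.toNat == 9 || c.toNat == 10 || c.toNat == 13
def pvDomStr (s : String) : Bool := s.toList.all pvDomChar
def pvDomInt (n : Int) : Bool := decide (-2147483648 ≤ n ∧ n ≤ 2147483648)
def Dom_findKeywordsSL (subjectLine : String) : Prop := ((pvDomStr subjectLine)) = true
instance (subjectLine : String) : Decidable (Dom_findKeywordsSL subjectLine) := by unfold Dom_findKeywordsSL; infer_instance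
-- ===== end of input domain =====

-- B replaces the nested count-then-compare loops by a short-circuiting existence test
-- over a keyword set (the cutoff is 1, so count ≥ 1 is exactly "some word is a keyword"): simpler.


-- ===== PORT A =====
def findKeywordsSL (subjectLine : String) : String :=
  let slKeys : List String := ["action", "response", "urgent", "required"]
  let slWords : List String := PySem.Str.split₀ subjectLine
  let cutoff : Int := 1
  let count : Int :=
    slWords.foldl (fun c x => slKeys.foldl (fun c y => if x == y then c + 1 else c) c) 0
  if count ≥ cutoff then "subjectLine_keywords:high" else "subjectLine_keywords:low"

-- ===== PORT B =====
def findKeywordsSL_alt (subjectLine : String) : String :=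
  let slKeys : PySem.Set String := PySem.Set.ofList ["action", "response", "urgent", "required"]
  if (PySem.Str.split₀ subjectLine).any (fun w => PySem.Set.contains slKeys w) then
    "subjectLine_keywords:high"
  else
    "subjectLine_keywords:low"

-- ===== PRECONDITION & SPEC =====
def Spec_findKeywordsSL (subjectLine : String) (out : String) : Prop := out = findKeywordsSL_alt subjectLine
instance (subjectLine : String) (out : String) : Decidable (Spec_findKeywordsSL subjectLine out) := by unfold Spec_findKeywordsSL; infer_instance

-- ===== CLAIM (what is proved, stated in full; the proofs are below) =====
def Claim_equal_findKeywordsSL : Prop := ∀ (subjectLine : String), Dom_findKeywordsSL subjectLine → Spec_findKeywordsSL subjectLine (findKeywordsSL subjectLine)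

-- ===== LEMMAS AND PROOFS =====

-- The inner loop over the keys adds 1 iff x is a keyword, else leaves the accumulator.
theorem pvInner (keys : List String) (x : String) (c : Int) :
    keys.foldl (fun c y => if x == y then c + 1 else c) c =
      c + (keys.count x : Int) := by
  induction keys generalizing c with
  | nil => simp
  | cons y ys ih =>
    simp only [List.foldl_cons, List.count_cons, ih]
    by_cases h : x = y
    · simp [h]; ring
    · have hb : (x == y) = false := by simp [h]
      simp [hb, Ne.symm h]

-- The outer loop's total is the sum of per-word keyword counts.
theorem pvOuter (keys words : List String) (c : Int) :
    words.foldl (fun c x => keys.foldl (fun c y => if x == y then c + 1 else c) c) c =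
      c + ((words.map (fun w => (keys.count w : Int))).sum) := by
  induction words generalizing c with
  | nil => simp
  | cons w ws ih =>
    rw [List.foldl_cons, pvInner, ih]
    simp only [List.map_cons, List.sum_cons]; ring

-- The sum of counts is ≥ 1 iff some word occurs among the keys.
theorem pvSumPos (keys words : List String) :
    (1 ≤ ((words.map (fun w => (keys.count w : Int))).sum)) ↔
      words.any (fun w => keys.contains w) = true := by
  induction words with
  | nil => simp
  | cons w ws ih =>
    simp only [List.map_cons, List.sum_cons, List.any_cons, Bool.or_eq_true]
    have hnn : 0 ≤ ((ws.map (fun w => (keys.count w : Int))).sum) := by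
      apply List.sum_nonneg; intro x hx
      simp only [List.mem_map] at hx
      obtain ⟨y, _, rfl⟩ := hx; positivity
    by_cases h : w ∈ keys
    · have : 1 ≤ (keys.count w : Int) := by
        have := List.count_pos_iff.mpr h; exact_mod_cast this
      constructor
      · intro _; left; exact List.elem_eq_true_of_mem h
      · intro _; linarith
    · have h0 : keys.count w = 0 := List.count_eq_zero.mpr h
      simp [h0, ih]
      exact fun hw => absurd hw h

theorem findKeywordsSL_spec : Claim_equal_findKeywordsSL := by
  intro s _
  show findKeywordsSL s = findKeywordsSL_alt s
  unfold findKeywordsSL findKeywordsSL_alt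
  have hset : PySem.Set.ofList ["action", "response", "urgent", "required"] =
      ["action", "response", "urgent", "required"] := by decide
  simp only [hset, pvOuter, zero_add, ge_iff_le]
  have hcon : (fun w => PySem.Set.contains ["action", "response", "urgent", "required"] w)
      = (fun w => (["action", "response", "urgent", "required"] : List String).contains w) := by
    funext w; rfl
  rw [hcon]
  by_cases h : (PySem.Str.split₀ s).any
      (fun w => (["action", "response", "urgent", "required"] : List String).contains w) = true
  · rw [if_pos ((pvSumPos _ _).mpr h), if_pos h]
  · rw [if_neg (fun hle => h ((pvSumPos _ _).mp hle)), if_neg h]
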